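-- pv_equiv track=rewrite | github.com/ji-yeon224/Algorithm | 프로그래머스/2/340212. ［PCCP 기출문제］ 2번 ／ 퍼즐 게임 챌린지/［PCCP 기출문제］ 2번 ／ 퍼즐 게임 챌린지.py | solution
-- ===== SOURCE A (Python) =====
-- def solution(diffs, times, limit):
--     answer = 0
--     minLevel = 1
--     maxLevel = max(diffs)
--     while minLevel < maxLevel:
--         level = (minLevel + maxLevel)//2
--         time = spentTime(level, diffs, times)
--         if time > limit:
--             minLevel = level + 1
--         else:
--             maxLevel = level
--
--     return maxLevel
--
-- def spentTime(level, diffs, times):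
--     total = times[0]
--     for i in range(1, len(diffs)):
--         tryCount = diffs[i]-level if diffs[i]-level > 0 else 0
--         total += (times[i-1]+times[i])*tryCount + times[i]
--     return total
-- ===== SOURCE B (Python) =====
-- def solution(diffs, times, limit):
--     # Same bisection probe sequence as the straightforward version, but the O(n)
--     # per-probe spentTime scan is replaced by O(log n) lookups: sort the
--     # (difficulty, retry-cost) pairs once, precompute suffix sums, and answer
--     # each spent-time query from them.
--     n = len(diffs)
--     top = max(diffs)
--     base = times[0] + sum(times[1:n])
--     pairs = sorted(((diffs[i], times[i - 1] + times[i]) for i in range(1, n)),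
--                    key=lambda p: p[0])
--     sufc = [0]
--     sufdc = [0]
--     for d, c in reversed(pairs):
--         sufc.append(sufc[-1] + c)
--         sufdc.append(sufdc[-1] + d * c)
--     sufc.reverse()
--     sufdc.reverse()
--     ds = [d for d, _ in pairs]
--     lo, hi = 1, top
--     while lo < hi:
--         mid = (lo + hi) // 2
--         k = bisect_above(ds, mid)
--         spent = base + sufdc[k] - mid * sufc[k]
--         if spent > limit:
--             lo = mid + 1
--         else:
--             hi = mid
--     return hi
--
--
-- def bisect_above(a, x):
--     # first index whose element exceeds x, in the sorted list a
--     lo, hi = 0, len(a)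
--     while lo < hi:
--         m = (lo + hi) // 2
--         if x < a[m]:
--             hi = m
--         else:
--             lo = m + 1
--     return lo
-- ===== Notes on version B (the rewrite author's own statement) =====
-- stated objective: faster
-- what changed: The O(n) spentTime scan done at every bisection probe is replaced by O(log n) work: the (difficulty, retry-cost) pairs are sorted once, suffix sums of cost and difficulty*cost are precomputed, and each probe is answered by an inner bisection over the sorted difficulties plus two suffix-sum lookups.
-- outside the precondition, e.g. on solution([1], [], 5): A returns 1, B raises IndexError
import Mathlib
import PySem

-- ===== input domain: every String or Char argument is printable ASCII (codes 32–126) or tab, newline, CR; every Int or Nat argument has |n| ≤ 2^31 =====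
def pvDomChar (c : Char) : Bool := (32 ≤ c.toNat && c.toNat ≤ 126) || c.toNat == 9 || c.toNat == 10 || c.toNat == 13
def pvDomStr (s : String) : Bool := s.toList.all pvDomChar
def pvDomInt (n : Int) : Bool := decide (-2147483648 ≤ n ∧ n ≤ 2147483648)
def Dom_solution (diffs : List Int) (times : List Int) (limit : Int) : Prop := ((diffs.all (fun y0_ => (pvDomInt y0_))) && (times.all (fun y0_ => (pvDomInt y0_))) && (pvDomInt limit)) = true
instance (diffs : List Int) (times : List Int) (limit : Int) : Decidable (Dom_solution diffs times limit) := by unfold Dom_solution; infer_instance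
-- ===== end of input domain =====

-- B keeps A's bisection probe sequence but removes the O(n) per-probe spentTime scan:
-- it sorts the (difficulty, retry-cost) pairs once, precomputes suffix sums, and answers
-- each spent-time probe with a short inner bisection over the sorted difficulties.

-- ===== PORT A =====
-- spentTime(level, diffs, times): indexing uses pyGetD (Pre_ guarantees every index is
-- in range, so the default is never the result).
def spentTimeA (level : Int) (diffs : List Int) (times : List Int) : Int :=
  (PySem.List.pyRange 1 (diffs.length : Int) 1).foldl
    (fun total i =>
      let tryCount := if PySem.List.pyGetD diffs i 0 - level > 0 then PySem.List.pyGetD diffs i 0 - level else 0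
      total + (PySem.List.pyGetD times (i - 1) 0 + PySem.List.pyGetD times i 0) * tryCount + PySem.List.pyGetD times i 0)
    (PySem.List.pyGetD times 0 0)

-- the 'while minLevel < maxLevel' loop of A
def solLoop (diffs : List Int) (times : List Int) (limit : Int) (minLevel maxLevel : Int) : Int :=
  if _h : minLevel < maxLevel then
    let level := PySem.Int.floordiv (minLevel + maxLevel) 2
    let time := spentTimeA level diffs times
    if time > limit then solLoop diffs times limit (level + 1) maxLevel
    else solLoop diffs times limit minLevel level
  else maxLevel
termination_by (maxLevel - minLevel).toNat
decreasing_by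
  · have h1 : minLevel ≤ PySem.Int.floordiv (minLevel + maxLevel) 2 := by
      rw [PySem.Int.le_floordiv_iff_mul_le (by omega)]; omega
    omega
  · have h2 : PySem.Int.floordiv (minLevel + maxLevel) 2 < maxLevel := by
      rw [PySem.Int.floordiv_lt_iff_lt_mul (by omega)]; omega
    omega

-- max(diffs) raises on an empty list; Pre_ excludes it, so the getD default is never the result.
def solution (diffs : List Int) (times : List Int) (limit : Int) : Int :=
  solLoop diffs times limit 1 ((PySem.List.max? diffs (fun y => y)).getD 0)

-- ===== PORT B =====
-- bisect_above's 'while lo < hi' loop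
def bisectAboveLoop (a : List Int) (x : Int) (lo hi : Int) : Int :=
  if _h : lo < hi then
    let m := PySem.Int.floordiv (lo + hi) 2
    if x < PySem.List.pyGetD a m 0 then bisectAboveLoop a x lo m
    else bisectAboveLoop a x (m + 1) hi
  else lo
termination_by (hi - lo).toNat
decreasing_by
  · have h2 : PySem.Int.floordiv (lo + hi) 2 < hi := by
      rw [PySem.Int.floordiv_lt_iff_lt_mul (by omega)]; omega
    omega
  · have h1 : lo ≤ PySem.Int.floordiv (lo + hi) 2 := by
      rw [PySem.Int.le_floordiv_iff_mul_le (by omega)]; omega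
    omega

def bisectAbove (a : List Int) (x : Int) : Int := bisectAboveLoop a x 0 (a.length : Int)

-- base = times[0] + sum(times[i] for i in range(1, n))
def baseB (diffs : List Int) (times : List Int) : Int :=
  PySem.List.pyGetD times 0 0 +
    ((PySem.List.pyRange 1 (diffs.length : Int) 1).map (fun i => PySem.List.pyGetD times i 0)).sum

-- pairs = sorted(((diffs[i], times[i-1] + times[i]) for i in range(1, n)), key=lambda p: p[0])
def pairsB (diffs : List Int) (times : List Int) : List (Int × Int) :=
  PySem.List.sorted
    ((PySem.List.pyRange 1 (diffs.length : Int) 1).map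
      (fun i => (PySem.List.pyGetD diffs i 0,
                 PySem.List.pyGetD times (i - 1) 0 + PySem.List.pyGetD times i 0)))
    (fun p => p.1)

-- the suffix-sum building loop over reversed(pairs), appending to [0]-seeded lists
def sufB (pairs : List (Int × Int)) : List Int × List Int :=
  pairs.reverse.foldl
    (fun (acc : List Int × List Int) p =>
      (acc.1 ++ [PySem.List.pyGetD acc.1 (-1) 0 + p.2],
       acc.2 ++ [PySem.List.pyGetD acc.2 (-1) 0 + p.1 * p.2]))
    ([0], [0])

-- the 'while lo < hi' bisection of B, probing via the precomputed suffix sums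
def solveB (base : Int) (sufc sufdc ds : List Int) (limit lo hi : Int) : Int :=
  if _h : lo < hi then
    let mid := PySem.Int.floordiv (lo + hi) 2
    let k := bisectAbove ds mid
    let spent := base + PySem.List.pyGetD sufdc k 0 - mid * PySem.List.pyGetD sufc k 0
    if spent > limit then solveB base sufc sufdc ds limit (mid + 1) hi
    else solveB base sufc sufdc ds limit lo mid
  else hi
termination_by (hi - lo).toNat
decreasing_by
  · have h1 : lo ≤ PySem.Int.floordiv (lo + hi) 2 := by
      rw [PySem.Int.le_floordiv_iff_mul_le (by omega)]; omega
    omega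
  · have h2 : PySem.Int.floordiv (lo + hi) 2 < hi := by
      rw [PySem.Int.floordiv_lt_iff_lt_mul (by omega)]; omega
    omega

def solution_alt (diffs : List Int) (times : List Int) (limit : Int) : Int :=
  solveB (baseB diffs times)
    (sufB (pairsB diffs times)).1.reverse
    (sufB (pairsB diffs times)).2.reverse
    ((pairsB diffs times).map (fun p => p.1))
    limit 1 ((PySem.List.max? diffs (fun y => y)).getD 0)

-- ===== PRECONDITION & SPEC =====
-- Pre_ = the natural problem shape: diffs nonempty (max([]) raises ValueError in A) and
-- len(times) ≥ len(diffs) (otherwise A's spentTime raises IndexError whenever the search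
-- loop runs, and B's upfront pair construction raises IndexError even when it does not).
def Pre_solution (diffs : List Int) (times : List Int) (limit : Int) : Prop :=
  diffs ≠ [] ∧ diffs.length ≤ times.length
instance (diffs : List Int) (times : List Int) (limit : Int) : Decidable (Pre_solution diffs times limit) := by unfold Pre_solution; infer_instance

def pvWitness_solution : List Int × List Int × Int := ([4, 3, 2], [2, 1, 3], 30)

def Spec_solution (diffs : List Int) (times : List Int) (limit : Int) (out : Int) : Prop := out = solution_alt diffs times limit
instance (diffs : List Int) (times : List Int) (limit : Int) (out : Int) : Decidable (Spec_solution diffs times limit out) := by unfold Spec_solution; infer_instance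

-- ===== CLAIM (what is proved, stated in full; the proofs are below) =====
def Claim_equal_solution : Prop := ∀ (diffs : List Int) (times : List Int) (limit : Int), Dom_solution diffs times limit → Pre_solution diffs times limit → Spec_solution diffs times limit (solution diffs times limit)

-- ===== LEMMAS AND PROOFS =====

-- folding '+ f i' over a list is the initial value plus the sum of the mapped list
theorem pv_foldl_add_sum {α : Type} (l : List α) (f : α → Int) (init : Int) :
    l.foldl (fun tot i => tot + f i) init = init + (l.map f).sum := by
  induction l generalizing init with
  | nil => simp
  | cons x xs ih => simp [ih]; ring

-- A's loop-accumulated spentTime in closed max-form: base plus the retry costs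
theorem spentA_eq (level : Int) (diffs times : List Int) :
    spentTimeA level diffs times =
      baseB diffs times +
        ((PySem.List.pyRange 1 (diffs.length : Int) 1).map
          (fun i => (PySem.List.pyGetD times (i - 1) 0 + PySem.List.pyGetD times i 0) *
            max (PySem.List.pyGetD diffs i 0 - level) 0)).sum := by
  unfold spentTimeA baseB
  have hfun :
      (fun (total i : Int) =>
        total + (PySem.List.pyGetD times (i - 1) 0 + PySem.List.pyGetD times i 0) *
            (if PySem.List.pyGetD diffs i 0 - level > 0 then PySem.List.pyGetD diffs i 0 - level else 0) +
          PySem.List.pyGetD times i 0)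
      = (fun (total i : Int) =>
        total + ((PySem.List.pyGetD times (i - 1) 0 + PySem.List.pyGetD times i 0) *
            max (PySem.List.pyGetD diffs i 0 - level) 0 +
          PySem.List.pyGetD times i 0)) := by
    funext total i
    by_cases h : PySem.List.pyGetD diffs i 0 - level > 0
    · rw [if_pos h, max_eq_left (by omega)]; ring
    · rw [if_neg h, max_eq_right (by omega)]; ring
  simp only [hfun]
  rw [pv_foldl_add_sum, PySem.List.sum_map_add_int]
  ring

-- the suffix-sum building loop, characterised by scanl
theorem suf_build (r : List (Int × Int)) :
    ∀ (a1 a2 : List Int) (h1 : a1 ≠ []) (h2 : a2 ≠ []),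
      r.foldl
        (fun (acc : List Int × List Int) p =>
          (acc.1 ++ [PySem.List.pyGetD acc.1 (-1) 0 + p.2],
           acc.2 ++ [PySem.List.pyGetD acc.2 (-1) 0 + p.1 * p.2]))
        (a1, a2)
      = (a1.dropLast ++ List.scanl (fun s p => s + p.2) (a1.getLast h1) r,
         a2.dropLast ++ List.scanl (fun s p => s + p.1 * p.2) (a2.getLast h2) r) := by
  induction r with
  | nil =>
    intro a1 a2 h1 h2
    simp [List.dropLast_append_getLast]
  | cons p r ih =>
    intro a1 a2 h1 h2
    rw [List.foldl_cons]
    have e1 : PySem.List.pyGetD a1 (-1) 0 = a1.getLast h1 := PySem.List.pyGetD_neg_one a1 0 h1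
    have e2 : PySem.List.pyGetD a2 (-1) 0 = a2.getLast h2 := PySem.List.pyGetD_neg_one a2 0 h2
    rw [e1, e2, ih _ _ (by simp) (by simp)]
    rw [List.dropLast_concat, List.dropLast_concat, List.getLast_concat, List.getLast_concat]
    rw [List.scanl_cons, List.scanl_cons]
    have hA : ∀ (l : List Int) (h : l ≠ []) (T : List Int),
        l.dropLast ++ (l.getLast h :: T) = l ++ T := by
      intro l h T
      conv_rhs => rw [← List.dropLast_append_getLast h]
      simp
    rw [hA a1 h1, hA a2 h2]

-- reading entry k of a reversed scanl-built suffix list gives the sum over drop k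
theorem suf_lookup (pairs : List (Int × Int)) (g : Int × Int → Int) (k : Int)
    (h0 : 0 ≤ k) (h1 : k ≤ (pairs.length : Int)) :
    PySem.List.pyGetD (List.scanl (fun s p => s + g p) 0 pairs.reverse).reverse k 0
      = ((pairs.drop k.toNat).map g).sum := by
  have hlen : (List.scanl (fun s p => s + g p) 0 pairs.reverse).length = pairs.length + 1 := by
    rw [List.length_scanl, List.length_reverse]
  rw [PySem.List.pyGetD_eq_getElem _ 0 h0 (by rw [List.length_reverse, hlen]; omega)]
  rw [List.getElem_reverse, List.getElem_scanl]
  rw [pv_foldl_add_sum, zero_add]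
  have hidx : (List.scanl (fun s p => s + g p) 0 pairs.reverse).length - 1 - k.toNat
      = pairs.length - k.toNat := by omega
  rw [hidx, List.take_reverse]
  have : pairs.length - (pairs.length - k.toNat) = k.toNat := by omega
  rw [this, List.map_reverse, List.sum_reverse]

-- a sorted-by-first-component pair list has monotone first components (via pyGetD)
theorem pairs_fst_mono (sp : List (Int × Int))
    (hs : sp.Pairwise (fun a b => a.1 ≤ b.1)) :
    ∀ i k : Int, 0 ≤ i → i ≤ k → k < ((sp.map (fun p => p.1)).length : Int) →
      PySem.List.pyGetD (sp.map (fun p => p.1)) i 0 ≤ PySem.List.pyGetD (sp.map (fun p => p.1)) k 0 := by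
  intro i k h0 hik hk
  rcases eq_or_lt_of_le hik with rfl | hlt
  · exact le_rfl
  · rw [PySem.List.pyGetD_eq_getElem _ 0 h0 (by omega),
        PySem.List.pyGetD_eq_getElem _ 0 (by omega) hk]
    have hmono := List.pairwise_iff_getElem.mp ((List.pairwise_map).mpr hs)
    have hmap : List.Pairwise (fun a b : Int => a ≤ b) (sp.map (fun p => p.1)) := by
      rw [List.pairwise_map]; exact hs
    have := List.pairwise_iff_getElem.mp hmap i.toNat k.toNat
      (by simp at hk ⊢; omega) (by simp at hk ⊢; omega) (by omega)
    exact this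

-- bisect_above's loop: everything left of the result is ≤ x, everything right exceeds x
theorem bisect_loop_spec (a : List Int) (x : Int)
    (hmono : ∀ i k : Int, 0 ≤ i → i ≤ k → k < (a.length : Int) →
      PySem.List.pyGetD a i 0 ≤ PySem.List.pyGetD a k 0) :
    ∀ (kk : Nat) (lo hi : Int), (hi - lo).toNat = kk → 0 ≤ lo → lo ≤ hi → hi ≤ (a.length : Int) →
      (lo ≤ bisectAboveLoop a x lo hi ∧ bisectAboveLoop a x lo hi ≤ hi) ∧
      (∀ i : Int, lo ≤ i → i < bisectAboveLoop a x lo hi → PySem.List.pyGetD a i 0 ≤ x) ∧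
      (∀ i : Int, bisectAboveLoop a x lo hi ≤ i → i < hi → x < PySem.List.pyGetD a i 0) := by
  intro kk
  induction kk using Nat.strong_induction_on with
  | _ kk ih =>
    intro lo hi hk hlo0 hlohi hhi
    by_cases hlt : lo < hi
    · have hm1 : lo ≤ PySem.Int.floordiv (lo + hi) 2 := by
        rw [PySem.Int.le_floordiv_iff_mul_le (by omega)]; omega
      have hm2 : PySem.Int.floordiv (lo + hi) 2 < hi := by
        rw [PySem.Int.floordiv_lt_iff_lt_mul (by omega)]; omega
      set m := PySem.Int.floordiv (lo + hi) 2 with hm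
      rw [bisectAboveLoop, dif_pos hlt]
      simp only [← hm]
      by_cases hcmp : x < PySem.List.pyGetD a m 0
      · rw [if_pos hcmp]
        obtain ⟨⟨hb1, hb2⟩, hleft, hright⟩ :=
          ih ((m - lo).toNat) (by omega) lo m rfl hlo0 (by omega) (by omega)
        refine ⟨⟨hb1, by omega⟩, hleft, ?_⟩
        intro i hji hihi
        by_cases him : i < m
        · exact hright i hji him
        · exact lt_of_lt_of_le hcmp (hmono m i (by omega) (by omega) (by omega))
      · rw [if_neg hcmp]
        obtain ⟨⟨hb1, hb2⟩, hleft, hright⟩ :=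
          ih ((hi - (m + 1)).toNat) (by omega) (m + 1) hi rfl (by omega) (by omega) hhi
        refine ⟨⟨by omega, hb2⟩, ?_, hright⟩
        intro i hloi hij
        by_cases him : i < m + 1
        · exact le_trans (hmono i m (by omega) (by omega) (by omega)) (by omega)
        · exact hleft i (by omega) hij
    · rw [bisectAboveLoop, dif_neg hlt]
      exact ⟨⟨le_rfl, by omega⟩, fun i h1 h2 => by omega, fun i h1 h2 => by omega⟩

-- the probe answered from the suffix sums equals A's spentTime, for every level
theorem probe_eq (diffs times : List Int) (L : Int) :
    baseB diffs times
      + PySem.List.pyGetD (sufB (pairsB diffs times)).2.reverse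
          (bisectAbove ((pairsB diffs times).map (fun p => p.1)) L) 0
      - L * PySem.List.pyGetD (sufB (pairsB diffs times)).1.reverse
          (bisectAbove ((pairsB diffs times).map (fun p => p.1)) L) 0
    = spentTimeA L diffs times := by
  set sp := pairsB diffs times with hsp
  set ds := sp.map (fun p => p.1) with hds
  set j := bisectAbove ds L with hj
  -- bisect spec with lo = 0, hi = length
  have hmono := pairs_fst_mono sp (by
    have := PySem.List.sorted_pairwise
      ((PySem.List.pyRange 1 (diffs.length : Int) 1).map
        (fun i => (PySem.List.pyGetD diffs i 0,
                   PySem.List.pyGetD times (i - 1) 0 + PySem.List.pyGetD times i 0)))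
      (fun p => p.1)
    exact this)
  obtain ⟨⟨hj0, hjlen⟩, hleft, hright⟩ :=
    bisect_loop_spec ds L hmono ((ds.length : Int) - 0).toNat 0 (ds.length : Int)
      rfl le_rfl (by omega) le_rfl
  have hfold : bisectAboveLoop ds L 0 ((ds.length : Int)) = j := rfl
  rw [hfold] at hj0 hjlen hleft hright
  have hjsp : j ≤ (sp.length : Int) := by simpa [hds] using hjlen
  -- suffix arrays via scanl
  have hbuild := suf_build sp.reverse [0] [0] (by simp) (by simp)
  have hsufc : (sufB sp).1 = List.scanl (fun s p => s + p.2) 0 sp.reverse := by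
    unfold sufB; rw [hbuild]; simp
  have hsufdc : (sufB sp).2 = List.scanl (fun s p => s + p.1 * p.2) 0 sp.reverse := by
    unfold sufB; rw [hbuild]; simp
  rw [hsufc, hsufdc,
      suf_lookup sp (fun p => p.2) j hj0 hjsp,
      suf_lookup sp (fun p => p.1 * p.2) j hj0 hjsp]
  -- now pure summation: base + Σ_{drop j} dc - L Σ_{drop j} c = base + Σ_{sp} c·max(d-L,0)
  rw [spentA_eq L diffs times]
  have hperm : (sp.map (fun p => p.2 * max (p.1 - L) 0)).sum
      = ((PySem.List.pyRange 1 (diffs.length : Int) 1).map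
          (fun i => (PySem.List.pyGetD times (i - 1) 0 + PySem.List.pyGetD times i 0) *
            max (PySem.List.pyGetD diffs i 0 - L) 0)).sum := by
    have hp : sp.Perm
        ((PySem.List.pyRange 1 (diffs.length : Int) 1).map
          (fun i => (PySem.List.pyGetD diffs i 0,
                     PySem.List.pyGetD times (i - 1) 0 + PySem.List.pyGetD times i 0))) :=
      PySem.List.sorted_perm _ _ _
    calc (sp.map (fun p => p.2 * max (p.1 - L) 0)).sum
        = (((PySem.List.pyRange 1 (diffs.length : Int) 1).map
            (fun i => (PySem.List.pyGetD diffs i 0,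
                       PySem.List.pyGetD times (i - 1) 0 + PySem.List.pyGetD times i 0))).map
              (fun p => p.2 * max (p.1 - L) 0)).sum := (hp.map _).sum_eq
      _ = _ := by rw [List.map_map]; rfl
  rw [← hperm]
  -- split sp at j
  have hsplit : sp = sp.take j.toNat ++ sp.drop j.toNat := (List.take_append_drop _ _).symm
  conv_rhs => rw [hsplit]
  rw [List.map_append, List.sum_append]
  have htake : ((sp.take j.toNat).map (fun p => p.2 * max (p.1 - L) 0)).sum = 0 := by
    apply List.sum_eq_zero
    intro x hx
    obtain ⟨p, hp, rfl⟩ := List.mem_map.mp hx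
    obtain ⟨i, hi, rfl⟩ := List.mem_iff_getElem.mp hp
    have hilen : i < sp.length := by
      have := hi; rw [List.length_take] at this; omega
    rw [List.getElem_take]
    have hdle : PySem.List.pyGetD ds (i : Int) 0 ≤ L := by
      apply hleft i (by omega)
      have := hi; rw [List.length_take] at this; omega
    rw [hds, PySem.List.pyGetD_eq_getElem _ 0 (by omega) (by simp; omega)] at hdle
    simp only [Int.toNat_natCast, List.getElem_map] at hdle
    rw [max_eq_right (by omega), mul_zero]
  have hdrop : ((sp.drop j.toNat).map (fun p => p.2 * max (p.1 - L) 0)).sum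
      = ((sp.drop j.toNat).map (fun p => p.1 * p.2)).sum
        - L * ((sp.drop j.toNat).map (fun p => p.2)).sum := by
    have hcg : (sp.drop j.toNat).map (fun p => p.2 * max (p.1 - L) 0)
        = (sp.drop j.toNat).map (fun p => p.1 * p.2 + p.2 * (-L)) := by
      apply List.map_congr_left
      intro p hp
      obtain ⟨i, hi, rfl⟩ := List.mem_iff_getElem.mp hp
      have hilen : i < sp.length - j.toNat := by
        have := hi; rw [List.length_drop] at this; omega
      rw [List.getElem_drop]
      have hdgt : L < PySem.List.pyGetD ds ((j.toNat + i : Nat) : Int) 0 := by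
        apply hright _ (by omega) (by simp only [hds, List.length_map]; push_cast; omega)
      rw [hds, PySem.List.pyGetD_eq_getElem _ 0 (by omega) (by simp; omega)] at hdgt
      simp only [Int.toNat_natCast, List.getElem_map] at hdgt
      rw [max_eq_left (by omega)]
      ring
    rw [hcg, show (fun p : Int × Int => p.1 * p.2 + p.2 * (-L))
          = (fun p : Int × Int => (fun q : Int × Int => q.1 * q.2) p + (fun q : Int × Int => q.2 * (-L)) p) from rfl,
        PySem.List.sum_map_add_int, List.sum_map_mul_right]
    ring
  rw [htake, hdrop]
  ring

-- A's loop body in if-then-else form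
theorem solLoop_unfold (diffs times : List Int) (limit lo hi : Int) :
    solLoop diffs times limit lo hi =
      if lo < hi then
        if spentTimeA (PySem.Int.floordiv (lo + hi) 2) diffs times > limit then
          solLoop diffs times limit (PySem.Int.floordiv (lo + hi) 2 + 1) hi
        else solLoop diffs times limit lo (PySem.Int.floordiv (lo + hi) 2)
      else hi := by
  rw [solLoop]
  simp only [dite_eq_ite]

-- solveB in if-then-else form
theorem solveB_unfold (base : Int) (sufc sufdc ds : List Int) (limit lo hi : Int) :
    solveB base sufc sufdc ds limit lo hi =
      if lo < hi then
        if base + PySem.List.pyGetD sufdc (bisectAbove ds (PySem.Int.floordiv (lo + hi) 2)) 0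
            - PySem.Int.floordiv (lo + hi) 2 *
              PySem.List.pyGetD sufc (bisectAbove ds (PySem.Int.floordiv (lo + hi) 2)) 0 > limit then
          solveB base sufc sufdc ds limit (PySem.Int.floordiv (lo + hi) 2 + 1) hi
        else solveB base sufc sufdc ds limit lo (PySem.Int.floordiv (lo + hi) 2)
      else hi := by
  rw [solveB]
  simp only [dite_eq_ite]

-- the two bisections agree step by step, since every probe returns the same value
theorem solve_eq (diffs times : List Int) (limit : Int) :
    ∀ (k : Nat) (lo hi : Int), (hi - lo).toNat = k →
      solLoop diffs times limit lo hi =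
        solveB (baseB diffs times)
          (sufB (pairsB diffs times)).1.reverse
          (sufB (pairsB diffs times)).2.reverse
          ((pairsB diffs times).map (fun p => p.1)) limit lo hi := by
  intro k
  induction k using Nat.strong_induction_on with
  | _ k ih =>
    intro lo hi hk
    by_cases hlt : lo < hi
    · have hm1 : lo ≤ PySem.Int.floordiv (lo + hi) 2 := by
        rw [PySem.Int.le_floordiv_iff_mul_le (by omega)]; omega
      have hm2 : PySem.Int.floordiv (lo + hi) 2 < hi := by
        rw [PySem.Int.floordiv_lt_iff_lt_mul (by omega)]; omega
      rw [solLoop_unfold, if_pos hlt, solveB_unfold, if_pos hlt]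
      set mid := PySem.Int.floordiv (lo + hi) 2 with hmid
      rw [probe_eq diffs times mid]
      by_cases hinf : spentTimeA mid diffs times > limit
      · rw [if_pos hinf, if_pos hinf]
        exact ih ((hi - (mid + 1)).toNat) (by omega) (mid + 1) hi rfl
      · rw [if_neg hinf, if_neg hinf]
        exact ih ((mid - lo).toNat) (by omega) lo mid rfl
    · rw [solLoop_unfold, if_neg hlt, solveB_unfold, if_neg hlt]

-- ===== VERDICT (by name: the statement is the Claim_ definition above) =====
theorem solution_spec : Claim_equal_solution := by
  intro diffs times limit _hdom _hpre
  unfold Spec_solution solution solution_alt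
  exact solve_eq diffs times limit _ 1 _ rfl
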